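-- pv_equiv track=rewrite | github.com/rice-awa/mc-mcp-server | server/agent_server.py | _match_uri_pattern
-- ===== SOURCE A (Python) =====
-- def _match_uri_pattern(uri: str, pattern: str) -> bool:
--     """
--     Match a URI against a pattern.
--
--     Args:
--         uri (str): URI to match
--         pattern (str): Pattern to match against
--
--     Returns:
--         bool: True if URI matches pattern, False otherwise
--     """
--     # Simple implementation - in a full version, use regex
--     uri_parts = uri.split("/")
--     pattern_parts = pattern.split("/")
--
--     if len(uri_parts) != len(pattern_parts):
--         return False
--
--     for i, pattern_part in enumerate(pattern_parts):
--         if pattern_part.startswith("{") and pattern_part.endswith("}"):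
--             # Parameter part, matches anything
--             continue
--         if pattern_part != uri_parts[i]:
--             return False
--
--     return True
-- ===== SOURCE B (Python) =====
-- def _match_uri_pattern(uri: str, pattern: str) -> bool:
--     # Head-segment descent: peel one leading segment off each string with
--     # split("/", 1), check that pair, and continue on the remainders --
--     # no full split into segment lists, exits at the first mismatch.
--     while True:
--         useg, *urest = uri.split("/", 1)
--         pseg, *prest = pattern.split("/", 1)
--         wild = pseg.startswith("{") and pseg.endswith("}")
--         if not (wild or pseg == useg):
--             return False
--         if not urest and not prest:
--             return True
--         if not urest or not prest:
--             return False
--         uri, pattern = urest[0], prest[0]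
-- ===== Notes on version B (the rewrite author's own statement) =====
-- stated objective: alternative
-- what changed: A splits both strings fully into segment lists, compares lengths, then loops with an index; B never builds the segment lists: it peels one leading segment off each string with split('/', 1), checks that pair, and recurses on the two remainders, exiting at the first mismatch.
import Mathlib
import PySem

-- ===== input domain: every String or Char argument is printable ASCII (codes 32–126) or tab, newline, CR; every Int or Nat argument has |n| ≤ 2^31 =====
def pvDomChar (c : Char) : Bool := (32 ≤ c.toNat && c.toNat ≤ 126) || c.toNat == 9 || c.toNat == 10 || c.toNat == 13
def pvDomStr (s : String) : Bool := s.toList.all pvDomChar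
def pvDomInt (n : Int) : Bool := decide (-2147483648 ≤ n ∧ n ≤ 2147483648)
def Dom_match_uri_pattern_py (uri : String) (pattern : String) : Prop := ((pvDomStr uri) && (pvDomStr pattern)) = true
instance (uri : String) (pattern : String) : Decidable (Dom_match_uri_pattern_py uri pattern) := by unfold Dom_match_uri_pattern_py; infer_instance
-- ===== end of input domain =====

-- B replaces A's full split + indexed loop by a recursive head-segment peel (split("/",1)) with early exit; same return value (alternative decomposition, no speed claim).

-- ===== PORT A =====
-- the for-loop over enumerate(pattern_parts) reading uri_parts[i]; ported as the
-- obvious paired structural recursion (the caller has checked equal lengths)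
def pvLoopA : List (List Char) → List (List Char) → Bool
  | [], _ => true
  | _ :: _, [] => true  -- not reached under the equal-length guard
  | pp :: ps, up :: us =>
    if PySem.Chars.startswith pp ['{'] && PySem.Chars.endswith pp ['}'] then pvLoopA ps us
    else if pp ≠ up then false
    else pvLoopA ps us

def match_uri_pattern_py (uri : String) (pattern : String) : Bool :=
  let uri_parts := PySem.Chars.splitOn uri.toList ['/']
  let pattern_parts := PySem.Chars.splitOn pattern.toList ['/']
  if uri_parts.length ≠ pattern_parts.length then false
  else pvLoopA pattern_parts uri_parts

-- ===== PORT B =====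
-- "is not the separator" predicate used throughout the lemmas
def pvNS (c : Char) : Bool := c ≠ '/'

-- s.split("/", 1) = PySem.Chars.splitOnMax s.toList ['/'] 1; the lemmas below
-- characterise it so that the port's recursion can cite pvSplit1_len for termination.
theorem pvGoMax0 (fuel : Nat) (l cur : List Char) (accs : List (List Char)) :
    PySem.Chars.splitOnMax.go ['/'] fuel 0 l cur accs = (((cur.reverse ++ l) :: accs).reverse) := by
  cases fuel with
  | zero => rw [PySem.Chars.splitOnMax.go.eq_def]
  | succ f =>
    cases l with
    | nil => rw [PySem.Chars.splitOnMax.go.eq_def]; simp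
    | cons c rest => rw [PySem.Chars.splitOnMax.go.eq_def]; simp

theorem pvGoMax1 (fuel : Nat) : ∀ (l cur : List Char) (accs : List (List Char)), l.length ≤ fuel →
    PySem.Chars.splitOnMax.go ['/'] fuel 1 l cur accs =
      accs.reverse ++ (if l.dropWhile pvNS = [] then [cur.reverse ++ l]
        else [cur.reverse ++ l.takeWhile pvNS, (l.dropWhile pvNS).tail]) := by
  induction fuel with
  | zero =>
    intro l cur accs h
    have hl : l = [] := List.length_eq_zero_iff.mp (Nat.le_zero.mp h)
    subst hl
    rw [PySem.Chars.splitOnMax.go.eq_def]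
    simp
  | succ f ih =>
    intro l cur accs h
    cases l with
    | nil => rw [PySem.Chars.splitOnMax.go.eq_def]; simp
    | cons c rest =>
      rw [PySem.Chars.splitOnMax.go.eq_def]
      by_cases hc : c = '/'
      · subst hc
        have hpre : List.isPrefixOf ['/'] ('/' :: rest) = true := by simp [List.isPrefixOf]
        simp only [hpre, if_pos]
        rw [if_neg (by norm_num)]
        rw [pvGoMax0]
        have hdw : ('/' :: rest).dropWhile pvNS = '/' :: rest := by
          rw [List.dropWhile_cons, if_neg (by simp [pvNS])]
        have htw : ('/' :: rest).takeWhile pvNS = [] := by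
          rw [List.takeWhile_cons, if_neg (by simp [pvNS])]
        rw [hdw, htw]
        simp
      · have hpre : List.isPrefixOf ['/'] (c :: rest) = false := by
          simp [List.isPrefixOf]
          intro hh
          exact absurd hh.symm hc
        simp only [hpre, Bool.false_eq_true, if_false]
        rw [if_neg (by norm_num)]
        rw [ih rest (c :: cur) accs (by simpa using Nat.le_of_succ_le_succ h)]
        have hdw : (c :: rest).dropWhile pvNS = rest.dropWhile pvNS := by
          rw [List.dropWhile_cons, if_pos (by simp [pvNS, hc])]
        have htw : (c :: rest).takeWhile pvNS = c :: rest.takeWhile pvNS := by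
          rw [List.takeWhile_cons, if_pos (by simp [pvNS, hc])]
        rw [hdw, htw]
        by_cases hr : rest.dropWhile pvNS = []
        · rw [if_pos hr, if_pos hr]; simp
        · rw [if_neg hr, if_neg hr]; simp

theorem pvSplit1 (l : List Char) :
    PySem.Chars.splitOnMax l ['/'] 1 =
      (if l.dropWhile pvNS = [] then [l]
       else [l.takeWhile pvNS, (l.dropWhile pvNS).tail]) := by
  have t1 : PySem.Chars.splitOnMax l ['/'] 1 = PySem.Chars.splitOnMax.go ['/'] (l.length + 1) 1 l [] [] := by
    rw [PySem.Chars.splitOnMax.eq_def]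
    rw [if_neg (by norm_num)]
    norm_num
  rw [t1, pvGoMax1 (l.length + 1) l [] [] (by omega)]
  simp only [List.reverse_nil, List.nil_append]

theorem pvSplit1_len (u : List Char) (a b : List Char) (rest : List (List Char))
    (h : PySem.Chars.splitOnMax u ['/'] 1 = a :: b :: rest) : b.length < u.length := by
  rw [pvSplit1] at h
  by_cases hd : u.dropWhile pvNS = []
  · rw [if_pos hd] at h; simp at h
  · rw [if_neg hd] at h
    have hb : b = (u.dropWhile pvNS).tail := by
      have := List.cons.inj h
      have := List.cons.inj this.2
      exact this.1.symm
    subst hb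
    have h1 : (u.dropWhile pvNS).length ≤ u.length := List.length_dropWhile_le _ _
    have h2 : (u.dropWhile pvNS).tail.length < (u.dropWhile pvNS).length := by
      cases hdw : u.dropWhile pvNS with
      | nil => exact absurd hdw hd
      | cons x xs => simp
    omega

def pvMatchB (u p : List Char) : Bool :=
  match hu : PySem.Chars.splitOnMax u ['/'] 1 with
  | [] => false  -- split never returns an empty list
  | useg :: urest =>
    match hp : PySem.Chars.splitOnMax p ['/'] 1 with
    | [] => false  -- split never returns an empty list
    | pseg :: prest =>
      let wild := PySem.Chars.startswith pseg ['{'] && PySem.Chars.endswith pseg ['}']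
      if !(wild || pseg == useg) then false
      else
        match urest, prest with
        | [], [] => true
        | [], _ :: _ => false
        | _ :: _, [] => false
        | ur :: _, pr :: _ => pvMatchB ur pr
termination_by u.length
decreasing_by
  exact pvSplit1_len u useg ur _ hu

def match_uri_pattern_py_alt (uri : String) (pattern : String) : Bool :=
  pvMatchB uri.toList pattern.toList

-- ===== PRECONDITION & SPEC =====
def Spec_match_uri_pattern_py (uri : String) (pattern : String) (out : Bool) : Prop := out = match_uri_pattern_py_alt uri pattern
instance (uri : String) (pattern : String) (out : Bool) : Decidable (Spec_match_uri_pattern_py uri pattern out) := by unfold Spec_match_uri_pattern_py; infer_instance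

-- ===== CLAIM (what is proved, stated in full; the proofs are below) =====
def Claim_equal_match_uri_pattern_py : Prop := ∀ (uri : String) (pattern : String), Dom_match_uri_pattern_py uri pattern → Spec_match_uri_pattern_py uri pattern (match_uri_pattern_py uri pattern)

-- ===== LEMMAS AND PROOFS =====

-- a direct recursive description of splitting on '/'
def pvSegs (l : List Char) : List (List Char) :=
  l.takeWhile pvNS ::
    (if h : l.dropWhile pvNS = [] then []
     else pvSegs ((l.dropWhile pvNS).tail))
termination_by l.length
decreasing_by
  have h1 : (l.dropWhile pvNS).length ≤ l.length := List.length_dropWhile_le _ _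
  have h2 : (l.dropWhile pvNS).tail.length < (l.dropWhile pvNS).length := by
    cases hdw : l.dropWhile pvNS with
    | nil => exact absurd hdw h
    | cons x xs => simp
  omega

def pvGlue (pre : List Char) : List (List Char) → List (List Char)
  | [] => [pre]
  | s :: ss => (pre ++ s) :: ss

theorem pvSegs_ne_nil (l : List Char) : pvSegs l ≠ [] := by
  rw [pvSegs]; simp

theorem pvGo_spec (fuel : Nat) : ∀ (l cur : List Char) (accs : List (List Char)), l.length ≤ fuel →
    PySem.Chars.splitOn.go ['/'] fuel l cur accs = accs.reverse ++ pvGlue cur.reverse (pvSegs l) := by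
  induction fuel with
  | zero =>
    intro l cur accs h
    have hl : l = [] := List.length_eq_zero_iff.mp (Nat.le_zero.mp h)
    subst hl
    rw [PySem.Chars.splitOn.go.eq_def, pvSegs]
    simp [pvGlue]
  | succ f ih =>
    intro l cur accs h
    cases l with
    | nil =>
      rw [PySem.Chars.splitOn.go.eq_def, pvSegs]
      simp [pvGlue]
    | cons c rest =>
      rw [PySem.Chars.splitOn.go.eq_def]
      by_cases hc : c = '/'
      · subst hc
        have hpre : List.isPrefixOf ['/'] ('/' :: rest) = true := by simp [List.isPrefixOf]
        simp only [hpre, if_pos, List.length_cons, List.length_nil, List.drop_succ_cons, List.drop_zero]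
        rw [ih rest [] (cur.reverse :: accs) (by simpa using Nat.le_of_succ_le_succ h)]
        conv_rhs => rw [pvSegs]
        have hdw : ('/' :: rest).dropWhile pvNS = '/' :: rest := by
          rw [List.dropWhile_cons, if_neg (by simp [pvNS])]
        have htw : ('/' :: rest).takeWhile pvNS = [] := by
          rw [List.takeWhile_cons, if_neg (by simp [pvNS])]
        rw [hdw, htw, dif_neg (by simp)]
        cases hs : pvSegs rest with
        | nil => exact absurd hs (pvSegs_ne_nil rest)
        | cons s ss => simp only [List.tail_cons]; rw [hs]; simp [pvGlue]
      · have hpre : List.isPrefixOf ['/'] (c :: rest) = false := by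
          simp [List.isPrefixOf]
          intro hh
          exact absurd hh.symm hc
        simp only [hpre, Bool.false_eq_true, if_false]
        rw [ih rest (c :: cur) accs (by simpa using Nat.le_of_succ_le_succ h)]
        have hdw : (c :: rest).dropWhile pvNS = rest.dropWhile pvNS := by
          rw [List.dropWhile_cons, if_pos (by simp [pvNS, hc])]
        have htw : (c :: rest).takeWhile pvNS = c :: rest.takeWhile pvNS := by
          rw [List.takeWhile_cons, if_pos (by simp [pvNS, hc])]
        conv_rhs => rw [pvSegs]
        rw [hdw, htw]
        conv_lhs => rw [pvSegs]
        simp [pvGlue]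

theorem pvSplitOn_eq_segs (l : List Char) : PySem.Chars.splitOn l ['/'] = pvSegs l := by
  unfold PySem.Chars.splitOn
  rw [pvGo_spec (l.length + 1) l [] [] (by omega)]
  cases hs : pvSegs l with
  | nil => exact absurd hs (pvSegs_ne_nil l)
  | cons s ss => simp [pvGlue]

theorem pvSplit1_ne_nil (u : List Char) : PySem.Chars.splitOnMax u ['/'] 1 ≠ [] := by
  rw [pvSplit1]; split_ifs <;> simp

theorem pvSegs_len_pos (l : List Char) : 0 < (pvSegs l).length := by
  cases hs : pvSegs l with
  | nil => exact absurd hs (pvSegs_ne_nil l)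
  | cons s ss => simp

theorem pvTakeWhile_eq_self (u : List Char) (h : u.dropWhile pvNS = []) : u.takeWhile pvNS = u := by
  have := List.takeWhile_append_dropWhile (p := pvNS) (l := u)
  rw [h, List.append_nil] at this
  exact this

theorem pvSeg_single (u a : List Char) (h : PySem.Chars.splitOnMax u ['/'] 1 = [a]) :
    a = u ∧ pvSegs u = [u] := by
  rw [pvSplit1] at h
  by_cases hd : u.dropWhile pvNS = []
  · rw [if_pos hd] at h
    refine ⟨(List.cons.inj h).1.symm, ?_⟩
    rw [pvSegs, dif_pos hd, pvTakeWhile_eq_self u hd]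
  · rw [if_neg hd] at h
    simp at h

theorem pvSeg_pair (u a b : List Char) (t : List (List Char))
    (h : PySem.Chars.splitOnMax u ['/'] 1 = a :: b :: t) :
    pvSegs u = a :: pvSegs b := by
  rw [pvSplit1] at h
  by_cases hd : u.dropWhile pvNS = []
  · rw [if_pos hd] at h; simp at h
  · rw [if_neg hd] at h
    have ha : a = u.takeWhile pvNS := ((List.cons.inj h).1).symm
    have hb : b = (u.dropWhile pvNS).tail := (List.cons.inj (List.cons.inj h).2).1.symm
    rw [pvSegs, dif_neg hd, ← ha, ← hb]

theorem pvSeg_head (u a : List Char) (r : List (List Char))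
    (h : PySem.Chars.splitOnMax u ['/'] 1 = a :: r) :
    ∃ T, pvSegs u = a :: T := by
  cases r with
  | nil => exact ⟨[], (pvSeg_single u a h).2 ▸ ((pvSeg_single u a h).1 ▸ rfl)⟩
  | cons b t => exact ⟨pvSegs b, pvSeg_pair u a b t h⟩

theorem pvLoopA_cons (pp up : List Char) (ps us : List (List Char)) :
    pvLoopA (pp :: ps) (up :: us) =
      (((PySem.Chars.startswith pp ['{'] && PySem.Chars.endswith pp ['}']) || pp == up) && pvLoopA ps us) := by
  rw [pvLoopA]
  split_ifs with h1 h2 <;> simp_all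

theorem pvMain (u p : List Char) :
    pvMatchB u p = (if (pvSegs u).length ≠ (pvSegs p).length then false else pvLoopA (pvSegs p) (pvSegs u)) := by
  fun_induction pvMatchB u p
  case case1 =>
    rename_i u p hu
    exact absurd hu (pvSplit1_ne_nil _)
  case case2 =>
    rename_i u p useg urest hu hp
    exact absurd hp (pvSplit1_ne_nil _)
  case case3 =>
    rename_i u p useg urest hu pseg prest hp wild hok
    obtain ⟨TU, hU⟩ := pvSeg_head u useg urest hu
    obtain ⟨TP, hP⟩ := pvSeg_head p pseg prest hp
    have hokf : ((PySem.Chars.startswith pseg ['{'] && PySem.Chars.endswith pseg ['}']) || pseg == useg) = false := by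
      cases hw : ((PySem.Chars.startswith pseg ['{'] && PySem.Chars.endswith pseg ['}']) || pseg == useg) with
      | false => rfl
      | true => rw [hw] at hok; exact Bool.noConfusion hok
    rw [hU, hP, pvLoopA_cons, hokf, Bool.false_and]
    split_ifs <;> rfl
  case case4 =>
    rename_i u p useg pseg wild hok hu hp2 hu1 hp
    obtain ⟨he, hU⟩ := pvSeg_single u useg hu
    obtain ⟨hf, hP⟩ := pvSeg_single p pseg hp
    have hokb : ((PySem.Chars.startswith pseg ['{'] && PySem.Chars.endswith pseg ['}']) || pseg == useg) = true := by
      cases hw : ((PySem.Chars.startswith pseg ['{'] && PySem.Chars.endswith pseg ['}']) || pseg == useg) with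
      | true => rfl
      | false => rw [hw] at hok; exact absurd rfl hok
    subst he; subst hf
    rw [hU, hP, if_neg (by simp), pvLoopA_cons]
    have h0 : pvLoopA ([] : List (List Char)) [] = true := rfl
    rw [h0, Bool.and_true, hokb]
  case case5 =>
    rename_i u p useg pseg wild hok pr t2 hu hp2 hu1 hp
    obtain ⟨he, hU⟩ := pvSeg_single u useg hu
    have hP := pvSeg_pair p pseg pr t2 hp
    rw [hU, hP, if_pos (by simp only [List.length_cons, List.length_nil]; have := pvSegs_len_pos pr; omega)]
  case case6 =>
    rename_i u p useg pseg wild hok ur t1 hu hp2 hu1 hp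
    have hU := pvSeg_pair u useg ur t1 hu
    obtain ⟨he, hP⟩ := pvSeg_single p pseg hp
    rw [hU, hP, if_pos (by simp only [List.length_cons, List.length_nil]; have := pvSegs_len_pos ur; omega)]
  case case7 =>
    rename_i u p useg pseg wild hok ur t1 pr t2 hu hp2 hu1 hp ih
    have hU := pvSeg_pair u useg ur t1 hu
    have hP := pvSeg_pair p pseg pr t2 hp
    have hokb : ((PySem.Chars.startswith pseg ['{'] && PySem.Chars.endswith pseg ['}']) || pseg == useg) = true := by
      cases hw : ((PySem.Chars.startswith pseg ['{'] && PySem.Chars.endswith pseg ['}']) || pseg == useg) with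
      | true => rfl
      | false => rw [hw] at hok; exact absurd rfl hok
    rw [ih, hU, hP, pvLoopA_cons, hokb, Bool.true_and]
    simp only [List.length_cons]
    by_cases hlen : (pvSegs ur).length = (pvSegs pr).length
    · rw [if_neg (by omega), if_neg (by omega)]
    · rw [if_pos (by omega), if_pos (by omega)]

-- ===== VERDICT (by name: the statement is the Claim_ definition above) =====
theorem match_uri_pattern_py_spec : Claim_equal_match_uri_pattern_py := by
  intro uri pattern _
  unfold Spec_match_uri_pattern_py match_uri_pattern_py match_uri_pattern_py_alt
  simp only [pvSplitOn_eq_segs]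
  rw [pvMain]
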